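-- pv_equiv track=rewrite | github.com/ashanka25/PA_101 | conftest.py | equiv
-- ===== SOURCE A (Python) =====
-- def equiv(l1, l2, key):
--     '''
--     Check if two tables are equivalent given a column that is sorted.
--     The function validates the sorting using the column next to the one being sorted.
--     It assumes no order in the additional column being validated.
--     :param l1: table1 (list of lists)
--     :param l2: table2 (list of lists)
--     :param key: key to sort both tables with
--     :return: True if both lists are same, else False
--     '''
--     # Sets to store values from the additional column used for validation
--     d1 = set()
--     d2 = set()
--
--     # The key of the column being used for validation
--     nkey = (key + 1) % 4
--
--     if len(l1) != len(l2):
--         # Expected and actual tables have different number of rows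
--         return False
--
--     for i in range(len(l1)):
--         if l1[i][key] != l2[i][key]:
--             # The sorting key is not identical in the expected and actual tables
--             return False
--
--         # Add the validation keys to the respective sets
--         d1.add(l1[i][nkey])
--         d2.add(l2[i][nkey])
--
--     # Check if the validation keys of the expected and actual tables match
--     return d1 == d2
-- ===== SOURCE B (Python) =====
-- def _canon(vals):
--     # canonical form of a multiset: sort, then drop adjacent duplicates
--     out = []
--     for x in sorted(vals):
--         if not out or out[-1] != x:
--             out.append(x)
--     return out
--
--
-- def equiv(l1, l2, key):
--     if len(l1) != len(l2):
--         return False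
--     if any(r1[key] != r2[key] for r1, r2 in zip(l1, l2)):
--         return False
--     nkey = (key + 1) % 4
--     return _canon([r[nkey] for r in l1]) == _canon([r[nkey] for r in l2])
-- ===== Notes on version B (the rewrite author's own statement) =====
-- stated objective: alternative
-- what changed: A's hash-set machinery (two sets grown inside the row loop, compared with set ==) is replaced by a sorted canonical form: the validation columns are extracted as plain lists, each is sorted and adjacent duplicates dropped, and the two canonical lists are compared by list equality; the key column is checked separately over zip(l1,l2).
import Mathlib
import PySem

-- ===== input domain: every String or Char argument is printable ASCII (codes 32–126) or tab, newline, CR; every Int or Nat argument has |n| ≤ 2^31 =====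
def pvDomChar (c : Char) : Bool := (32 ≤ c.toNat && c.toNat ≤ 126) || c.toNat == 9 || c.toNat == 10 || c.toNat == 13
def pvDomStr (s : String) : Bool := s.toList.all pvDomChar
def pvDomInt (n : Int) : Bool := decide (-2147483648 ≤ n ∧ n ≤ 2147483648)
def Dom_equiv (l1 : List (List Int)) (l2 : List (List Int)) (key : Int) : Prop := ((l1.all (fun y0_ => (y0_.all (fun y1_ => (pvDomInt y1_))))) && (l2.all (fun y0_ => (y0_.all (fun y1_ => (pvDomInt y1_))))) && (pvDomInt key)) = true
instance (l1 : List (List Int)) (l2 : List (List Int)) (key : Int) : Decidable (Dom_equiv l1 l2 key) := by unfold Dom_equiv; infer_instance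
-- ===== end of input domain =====

-- B replaces A's hash-set machinery (two sets grown inside the fused row loop, compared with
-- set ==) by a sorted canonical form: a zip pass checks the key column, then each validation
-- column is sorted, adjacent duplicates dropped, and the canonical lists compared; same task,
-- different data structure (sorting instead of sets).


-- ===== PORT A =====
-- the for-loop over i in range(len(l1)): lengths are equal at the call, so it is the
-- simultaneous walk of the two row lists, carrying the two sets d1 d2
def equivLoopA (key nkey : Int) : List (List Int) → List (List Int) → PySem.Set Int → PySem.Set Int → Bool
  | r1 :: t1, r2 :: t2, d1, d2 =>
      if PySem.List.pyGetD r1 key 0 ≠ PySem.List.pyGetD r2 key 0 then false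
      else equivLoopA key nkey t1 t2 (PySem.Set.add d1 (PySem.List.pyGetD r1 nkey 0))
                                     (PySem.Set.add d2 (PySem.List.pyGetD r2 nkey 0))
  | _, _, d1, d2 => PySem.Set.equal d1 d2

def equiv (l1 : List (List Int)) (l2 : List (List Int)) (key : Int) : Bool :=
  let nkey := PySem.Int.mod (key + 1) 4
  if l1.length ≠ l2.length then false
  else equivLoopA key nkey l1 l2 PySem.Set.empty PySem.Set.empty

-- ===== PORT B =====
-- _canon's loop body: 'if not out or out[-1] != x: out.append(x)'
def canonStep (out : List Int) (x : Int) : List Int :=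
  if out.getLast? = some x then out else out ++ [x]

-- _canon(vals): sort, then drop adjacent duplicates
def canon (vals : List Int) : List Int :=
  (PySem.List.sorted vals (fun v => v) false).foldl canonStep []

def equiv_alt (l1 : List (List Int)) (l2 : List (List Int)) (key : Int) : Bool :=
  if l1.length ≠ l2.length then false
  else if (l1.zip l2).any (fun p => PySem.List.pyGetD p.1 key 0 != PySem.List.pyGetD p.2 key 0) then false
  else
    let nkey := PySem.Int.mod (key + 1) 4
    canon (l1.map fun r => PySem.List.pyGetD r nkey 0) == canon (l2.map fun r => PySem.List.pyGetD r nkey 0)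

-- ===== PRECONDITION & SPEC =====
-- Pre_ is exactly the inputs on which the Python programs return normally (no IndexError):
-- the length guard fires, or every row of both tables has valid key and nkey indices, or there is
-- a first key mismatch at a row both tables can index, preceded only by fully indexable rows.
def RowKeyOk (key : Int) (r : List Int) : Prop := PySem.Raise.InRange r.length key
def RowOk (key : Int) (r : List Int) : Prop :=
  PySem.Raise.InRange r.length key ∧ PySem.Raise.InRange r.length (PySem.Int.mod (key + 1) 4)
def Pre_equiv (l1 : List (List Int)) (l2 : List (List Int)) (key : Int) : Prop :=
  l1.length ≠ l2.length ∨
    ((∀ r ∈ l1, RowOk key r) ∧ (∀ r ∈ l2, RowOk key r)) ∨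
    (∃ i, i < l1.length ∧ i < l2.length ∧
      (∀ j < i, RowOk key (l1.getD j []) ∧ RowOk key (l2.getD j [])) ∧
      RowKeyOk key (l1.getD i []) ∧ RowKeyOk key (l2.getD i []) ∧
      PySem.List.pyGetD (l1.getD i []) key 0 ≠ PySem.List.pyGetD (l2.getD i []) key 0)
instance (l1 : List (List Int)) (l2 : List (List Int)) (key : Int) : Decidable (Pre_equiv l1 l2 key) := by unfold Pre_equiv RowOk RowKeyOk; infer_instance

def pvWitness_equiv : List (List Int) × List (List Int) × Int := ([[1, 2, 3, 4], [2, 5, 0, 1]], [[1, 2, 3, 4], [2, 5, 9, 1]], 0)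

def Spec_equiv (l1 : List (List Int)) (l2 : List (List Int)) (key : Int) (out : Bool) : Prop := out = equiv_alt l1 l2 key
instance (l1 : List (List Int)) (l2 : List (List Int)) (key : Int) (out : Bool) : Decidable (Spec_equiv l1 l2 key out) := by unfold Spec_equiv; infer_instance

-- ===== CLAIM (what is proved, stated in full; the proofs are below) =====
def Claim_equal_equiv : Prop := ∀ (l1 : List (List Int)) (l2 : List (List Int)) (key : Int), Dom_equiv l1 l2 key → Pre_equiv l1 l2 key → Spec_equiv l1 l2 key (equiv l1 l2 key)

-- ===== LEMMAS AND PROOFS =====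

-- the fused loop of A, unfolded into a key pass plus two set-building folds (equal-length tables)
theorem equivLoopA_eq (key nkey : Int) (t1 t2 : List (List Int)) (d1 d2 : PySem.Set Int)
    (h : t1.length = t2.length) :
    equivLoopA key nkey t1 t2 d1 d2 =
      if (t1.zip t2).all (fun p => PySem.List.pyGetD p.1 key 0 == PySem.List.pyGetD p.2 key 0) then
        PySem.Set.equal (t1.foldl (fun s r => PySem.Set.add s (PySem.List.pyGetD r nkey 0)) d1)
                        (t2.foldl (fun s r => PySem.Set.add s (PySem.List.pyGetD r nkey 0)) d2)
      else false := by
  induction t1 generalizing t2 d1 d2 with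
  | nil =>
    cases t2 with
    | nil => simp [equivLoopA]
    | cons r2 t2 => simp at h
  | cons r1 t1 ih =>
    cases t2 with
    | nil => simp at h
    | cons r2 t2 =>
      simp only [List.length_cons, Nat.add_right_cancel_iff] at h
      by_cases hk : PySem.List.pyGetD r1 key 0 = PySem.List.pyGetD r2 key 0
      · simp [equivLoopA, hk, ih _ _ _ h, List.zip_cons_cons]
      · simp [equivLoopA, hk, List.zip_cons_cons]

-- a strictly increasing list whose members are all ≤ v and that contains v ends in v
theorem getLast?_of_mem_of_le (out : List Int) (v : Int)
    (hp : out.Pairwise (· < ·)) (hv : v ∈ out) (hle : ∀ x ∈ out, x ≤ v) :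
    out.getLast? = some v := by
  induction out with
  | nil => simp at hv
  | cons a t ih =>
    rcases List.pairwise_cons.mp hp with ⟨ha, hpt⟩
    cases t with
    | nil =>
      simp only [List.mem_singleton] at hv
      simp [hv]
    | cons b t' =>
      have hvt : v ∈ b :: t' := by
        rcases hv with _ | hv
        · exact absurd (hle b (by simp)) (not_le.mpr (ha b (by simp)))
        · assumption
      have := ih hpt hvt (fun x hx => hle x (List.mem_cons_of_mem _ hx))
      simpa [List.getLast?_cons_cons] using this

-- invariant of _canon's loop: over a ≤-sorted input it keeps the accumulator strictly
-- increasing and collects exactly the members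
theorem canon_go (l out : List Int) (hl : l.Pairwise (· ≤ ·))
    (hout : out.Pairwise (· < ·)) (hsep : ∀ x ∈ out, ∀ w ∈ l, x ≤ w) :
    (l.foldl canonStep out).Pairwise (· < ·) ∧
      ∀ x, x ∈ l.foldl canonStep out ↔ x ∈ out ∨ x ∈ l := by
  induction l generalizing out with
  | nil => simpa using hout
  | cons v l ih =>
    rcases List.pairwise_cons.mp hl with ⟨hvl, hl'⟩
    by_cases hlast : out.getLast? = some v
    · have hvmem : v ∈ out := List.mem_of_getLast? hlast
      have step : canonStep out v = out := by simp [canonStep, hlast]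
      rw [List.foldl_cons, step]
      rcases ih out hl' hout (fun x hx w hw => hsep x hx w (List.mem_cons_of_mem _ hw)) with ⟨h1, h2⟩
      refine ⟨h1, fun x => ?_⟩
      rw [h2 x]
      constructor
      · rintro (h | h)
        · exact Or.inl h
        · exact Or.inr (List.mem_cons_of_mem _ h)
      · rintro (h | h)
        · exact Or.inl h
        · rcases List.mem_cons.mp h with rfl | h
          · exact Or.inl hvmem
          · exact Or.inr h
    · have hlt : ∀ x ∈ out, x < v := by
        intro x hx
        rcases lt_or_eq_of_le (hsep x hx v (by simp)) with h | rfl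
        · exact h
        · exact absurd (getLast?_of_mem_of_le out x hout hx (fun y hy => hsep y hy x (by simp))) hlast
      have step : canonStep out v = out ++ [v] := by simp [canonStep, hlast]
      rw [List.foldl_cons, step]
      have hout' : (out ++ [v]).Pairwise (· < ·) := by
        rw [List.pairwise_append]
        exact ⟨hout, by simp, by intro a ha b hb; simp at hb; subst hb; exact hlt a ha⟩
      have hsep' : ∀ x ∈ out ++ [v], ∀ w ∈ l, x ≤ w := by
        intro x hx w hw
        rcases List.mem_append.mp hx with h | h
        · exact hsep x h w (List.mem_cons_of_mem _ hw)
        · simp at h; subst h; exact hvl w hw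
      rcases ih (out ++ [v]) hl' hout' hsep' with ⟨h1, h2⟩
      refine ⟨h1, fun x => ?_⟩
      rw [h2 x]
      simp [List.mem_append, List.mem_cons]
      tauto

theorem canon_pairwise (v : List Int) : (canon v).Pairwise (· < ·) :=
  (canon_go _ [] (PySem.List.sorted_pairwise v (fun x => x) ) (by simp) (by simp)).1

theorem mem_canon (v : List Int) (x : Int) : x ∈ canon v ↔ x ∈ v := by
  have := (canon_go (PySem.List.sorted v (fun x => x) false) []
    (PySem.List.sorted_pairwise v (fun x => x)) (by simp) (by simp)).2 x
  unfold canon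
  rw [this]
  simp [PySem.List.mem_sorted]

-- set equality of the value multisets is equality of their sorted-dedup canonical forms
theorem setEqual_eq_canon (v1 v2 : List Int) :
    PySem.Set.equal (PySem.Set.ofList v1) (PySem.Set.ofList v2) = (canon v1 == canon v2) := by
  by_cases h : canon v1 = canon v2
  · have : PySem.Set.equal (PySem.Set.ofList v1) (PySem.Set.ofList v2) = true := by
      rw [PySem.Set.equal_iff]
      intro x
      rw [PySem.Set.mem_ofList, PySem.Set.mem_ofList, ← mem_canon v1 x, ← mem_canon v2 x, h]
    simp [this, h]
  · have : ¬ PySem.Set.equal (PySem.Set.ofList v1) (PySem.Set.ofList v2) = true := by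
      rw [PySem.Set.equal_iff]
      intro hmem
      apply h
      have hperm : (canon v1).Perm (canon v2) := by
        rw [List.perm_ext_iff_of_nodup (canon_pairwise v1).nodup (canon_pairwise v2).nodup]
        intro x
        rw [mem_canon, mem_canon]
        have := hmem x
        simpa [PySem.Set.mem_ofList] using this
      exact hperm.eq_of_pairwise (fun a b _ _ h1 h2 => absurd h2 (lt_asymm h1))
        (canon_pairwise v1) (canon_pairwise v2)
    simp only [Bool.not_eq_true] at this
    simp [this, h]

-- ===== VERDICT (by name: the statement is the Claim_ definition above) =====
theorem equiv_spec : Claim_equal_equiv := by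
  intro l1 l2 key _ _
  unfold Spec_equiv equiv equiv_alt
  by_cases hlen : l1.length = l2.length
  · simp only [hlen, ne_eq, not_true_eq_false, if_false]
    rw [equivLoopA_eq _ _ _ _ _ _ hlen]
    by_cases hall : (l1.zip l2).all (fun p => PySem.List.pyGetD p.1 key 0 == PySem.List.pyGetD p.2 key 0)
    · have hany : ((l1.zip l2).any fun p => PySem.List.pyGetD p.1 key 0 != PySem.List.pyGetD p.2 key 0) = false := by
        rw [List.any_eq_false]
        intro p hp
        simp only [List.all_eq_true, beq_iff_eq] at hall
        simp [hall p hp]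
      simp only [hall, if_true, hany, Bool.false_eq_true, if_false]
      have h1 : ∀ (l : List (List Int)) (nkey : Int),
          l.foldl (fun s r => PySem.Set.add s (PySem.List.pyGetD r nkey 0)) PySem.Set.empty =
            PySem.Set.ofList (l.map fun r => PySem.List.pyGetD r nkey 0) := by
        intro l nkey
        rw [← PySem.Set.update_map_eq_foldl_add]
        simp [PySem.Set.empty, PySem.Set.update_nil_left]
      rw [h1, h1, setEqual_eq_canon]
    · have hany : (l1.zip l2).any (fun p => PySem.List.pyGetD p.1 key 0 != PySem.List.pyGetD p.2 key 0) = true := by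
        simp only [List.all_eq_true, beq_iff_eq] at hall
        push Not at hall
        rcases hall with ⟨p, hp, hne⟩
        simp only [List.any_eq_true, bne_iff_ne]
        exact ⟨p, hp, hne⟩
      simp [hall, hany]
  · simp [hlen]
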